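-- pv_equiv track=rewrite | github.com/sola-st/CMI-Finder | src/data_generation/pattern_based_mutation.py | construct_condition_template_hierarchy
-- ===== SOURCE A (Python) =====
-- def construct_condition_template_hierarchy(templates):
--     condition_templates_h = {}
--     for t in templates:
--         condition = t[0]
--         if t[1] is None:
--             continue
--         c_temp_0 = t[1][0]
--         c_temp_1 = t[1][1]
--
--
--         c_plain_temp_0 = ' '.join([c[1] if c[1]!='OTH' else c[0] for c in c_temp_0])
--         c_plain_temp_1 = ' '.join([c[1] if c[1]!='OTH' else c[0] for c in c_temp_1])
--
--         if c_plain_temp_0 in condition_templates_h: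
--             if c_plain_temp_1 in condition_templates_h[c_plain_temp_0]:
--                 condition_templates_h[c_plain_temp_0][c_plain_temp_1].append((condition, c_temp_0, c_temp_1))
--             else:
--                 condition_templates_h[c_plain_temp_0][c_plain_temp_1] = [(condition, c_temp_0, c_temp_1)]
--         else:
--             condition_templates_h[c_plain_temp_0] = {c_plain_temp_1: [(condition, c_temp_0, c_temp_1)]}
--
--     return condition_templates_h
-- ===== SOURCE B (Python) =====
-- def construct_condition_template_hierarchy(templates):
--     # Different decomposition: flatten to a list of (outer-key, inner-key, payload)
--     # records, then assemble the nested dict by ordered-dedup of keys plus filtering.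
--     recs = []
--     for condition, pair in templates:
--         if pair is None:
--             continue
--         c_temp_0, c_temp_1 = pair
--         k0 = ' '.join(c[1] if c[1] != 'OTH' else c[0] for c in c_temp_0)
--         k1 = ' '.join(c[1] if c[1] != 'OTH' else c[0] for c in c_temp_1)
--         recs.append((k0, k1, (condition, c_temp_0, c_temp_1)))
--     return {
--         k0: {
--             k1: [p for a, b, p in recs if a == k0 and b == k1]
--             for k1 in dict.fromkeys(b for a, b, _ in recs if a == k0)
--         }
--         for k0 in dict.fromkeys(a for a, _, _ in recs)
--     }
-- ===== Notes on version B (the rewrite author's own statement) =====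
-- stated objective: alternative
-- what changed: Replaces A's incremental nested-dict updates (membership tests and in-place appends per template) by a flatten-then-assemble pass: build a flat record list, then construct the nested dict by ordered key-deduplication (dict.fromkeys) and filtering comprehensions.
import Mathlib
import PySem

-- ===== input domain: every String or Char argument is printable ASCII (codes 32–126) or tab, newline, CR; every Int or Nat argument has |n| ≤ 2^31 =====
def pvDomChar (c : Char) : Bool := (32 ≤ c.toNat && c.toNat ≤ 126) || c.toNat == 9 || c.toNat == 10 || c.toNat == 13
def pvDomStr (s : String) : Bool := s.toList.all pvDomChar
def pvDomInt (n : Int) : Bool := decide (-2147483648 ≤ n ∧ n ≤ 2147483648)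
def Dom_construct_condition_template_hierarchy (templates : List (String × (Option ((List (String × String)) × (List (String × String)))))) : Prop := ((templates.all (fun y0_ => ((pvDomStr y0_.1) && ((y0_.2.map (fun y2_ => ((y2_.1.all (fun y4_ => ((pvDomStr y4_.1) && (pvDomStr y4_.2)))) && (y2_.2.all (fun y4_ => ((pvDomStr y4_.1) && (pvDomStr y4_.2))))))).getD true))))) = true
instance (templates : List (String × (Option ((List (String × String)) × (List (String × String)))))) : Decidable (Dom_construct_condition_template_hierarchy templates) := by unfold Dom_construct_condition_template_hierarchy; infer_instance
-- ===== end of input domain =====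

-- B rebuilds the same nested grouping by a flatten-then-assemble pass (flat record
-- list, ordered key dedup, filtering) instead of A's incremental nested-dict updates;
-- objective: alternative decomposition (no speed claim).

abbrev pvP : Type := String × (List (String × String)) × (List (String × String))
abbrev pvRec : Type := String × String × pvP
abbrev pvOuter : Type := PySem.Dict String (PySem.Dict String (List pvP))

-- shared by both ports: ' '.join([c[1] if c[1]!='OTH' else c[0] for c in l])
def pvKey (l : List (String × String)) : String :=
  PySem.Str.join " " (l.map (fun c => if c.2 != "OTH" then c.2 else c.1))

-- ===== PORT A =====
-- the body of A's for-loop, one template at a time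
def pvStepA (d : pvOuter) (t : String × (Option ((List (String × String)) × (List (String × String))))) : pvOuter :=
  match t.2 with
  | none => d
  | some ct =>
    let k0 := pvKey ct.1
    let k1 := pvKey ct.2
    let p : pvP := (t.1, ct.1, ct.2)
    if d.contains k0 then
      if (d.getD k0 PySem.Dict.empty).contains k1 then
        d.insert k0 ((d.getD k0 PySem.Dict.empty).modify k1 [] (fun l => l ++ [p]))
      else
        d.insert k0 ((d.getD k0 PySem.Dict.empty).insert k1 [p])
    else
      d.insert k0 (PySem.Dict.ofList [(k1, [p])])

def construct_condition_template_hierarchy (templates : List (String × (Option ((List (String × String)) × (List (String × String)))))) : List (String × List (String × List (String × (List (String × String)) × (List (String × String))))) :=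
  ((templates.foldl pvStepA PySem.Dict.empty).items).map (fun kv => (kv.1, kv.2.items))

-- ===== PORT B =====
-- the body of B's record-collecting loop
def pvRecStep (acc : List pvRec) (t : String × (Option ((List (String × String)) × (List (String × String))))) : List pvRec :=
  match t.2 with
  | none => acc
  | some ct => acc ++ [(pvKey ct.1, pvKey ct.2, (t.1, ct.1, ct.2))]

def construct_condition_template_hierarchy_alt (templates : List (String × (Option ((List (String × String)) × (List (String × String)))))) : List (String × List (String × List (String × (List (String × String)) × (List (String × String))))) :=
  let recs := templates.foldl pvRecStep []
  (PySem.List.dedup (recs.map (fun r => r.1))).map (fun k0 =>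
    (k0, (PySem.List.dedup ((recs.filter (fun r => r.1 == k0)).map (fun r => r.2.1))).map (fun k1 =>
      (k1, (recs.filter (fun r => r.1 == k0 && r.2.1 == k1)).map (fun r => r.2.2)))))

-- ===== PRECONDITION & SPEC =====
def Spec_construct_condition_template_hierarchy (templates : List (String × (Option ((List (String × String)) × (List (String × String)))))) (out : List (String × List (String × List (String × (List (String × String)) × (List (String × String)))))) : Prop := out = construct_condition_template_hierarchy_alt templates
instance (templates : List (String × (Option ((List (String × String)) × (List (String × String)))))) (out : List (String × List (String × List (String × (List (String × String)) × (List (String × String)))))) : Decidable (Spec_construct_condition_template_hierarchy templates out) := by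
  unfold Spec_construct_condition_template_hierarchy
  have h1 : DecidableEq (String × (List (String × String)) × (List (String × String))) := by infer_instance
  have h2 : DecidableEq (String × List (String × (List (String × String)) × (List (String × String)))) := by
    have := @instDecidableEqList _ h1
    infer_instance
  have h3 : DecidableEq (String × List (String × List (String × (List (String × String)) × (List (String × String))))) := by
    have := @instDecidableEqList _ h2
    infer_instance
  exact @instDecidableEqList _ h3 out (construct_condition_template_hierarchy_alt templates)

-- ===== CLAIM (what is proved, stated in full; the proofs are below) =====
def Claim_equal_construct_condition_template_hierarchy : Prop := ∀ (templates : List (String × (Option ((List (String × String)) × (List (String × String)))))), Dom_construct_condition_template_hierarchy templates → Spec_construct_condition_template_hierarchy templates (construct_condition_template_hierarchy templates)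

-- ===== LEMMAS AND PROOFS =====

-- record-level version of A's loop body
def pvStepR (d : pvOuter) (r : pvRec) : pvOuter :=
  if d.contains r.1 then
    if (d.getD r.1 PySem.Dict.empty).contains r.2.1 then
      d.insert r.1 ((d.getD r.1 PySem.Dict.empty).modify r.2.1 [] (fun l => l ++ [r.2.2]))
    else
      d.insert r.1 ((d.getD r.1 PySem.Dict.empty).insert r.2.1 [r.2.2])
  else
    d.insert r.1 (PySem.Dict.ofList [(r.2.1, [r.2.2])])

def pvRecsOf (ts : List (String × (Option ((List (String × String)) × (List (String × String)))))) : List pvRec :=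
  ts.filterMap (fun t => t.2.map (fun ct => (pvKey ct.1, pvKey ct.2, (t.1, ct.1, ct.2))))

-- inner-dict item list at outer key k0, as built from the records
def pvIB (rs : List pvRec) (k0 : String) : List (String × List pvP) :=
  (PySem.Set.ofList ((rs.filter (fun r => r.1 == k0)).map (fun r => r.2.1))).map (fun k1 =>
    (k1, (rs.filter (fun r => r.1 == k0 && r.2.1 == k1)).map (fun r => r.2.2)))

-- outer-dict item list, as built from the records
def pvL (rs : List pvRec) : List (String × PySem.Dict String (List pvP)) :=
  (PySem.Set.ofList (rs.map (fun r => r.1))).map (fun k0 => (k0, PySem.Dict.mk (pvIB rs k0)))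

lemma pvRecStep_fold (ts : List (String × (Option ((List (String × String)) × (List (String × String)))))) :
    ∀ acc, ts.foldl pvRecStep acc = acc ++ pvRecsOf ts := by
  induction ts with
  | nil => intro acc; simp [pvRecsOf]
  | cons t ts ih =>
    intro acc
    cases h : t.2 <;> simp [pvRecStep, pvRecsOf, h, ih]
  
lemma pvFoldA_eq (ts : List (String × (Option ((List (String × String)) × (List (String × String)))))) :
    ∀ d, ts.foldl pvStepA d = (pvRecsOf ts).foldl pvStepR d := by
  induction ts with
  | nil => intro d; simp [pvRecsOf]
  | cons t ts ih =>
    intro d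
    cases h : t.2 <;> simp [pvStepA, pvStepR, pvRecsOf, h, ih]

lemma pvOfList_snoc {α : Type} [BEq α] [LawfulBEq α] (xs : List α) (x : α) :
    PySem.Set.ofList (xs ++ [x]) =
      if x ∈ xs then PySem.Set.ofList xs else PySem.Set.ofList xs ++ [x] := by
  have h : PySem.Set.ofList (xs ++ [x]) = (PySem.Set.ofList xs).add x := by
    simp [PySem.Set.ofList, List.foldl_append]
  rw [h, PySem.Set.add]
  by_cases hx : x ∈ xs
  · simp [hx, (PySem.Set.mem_ofList xs x).2 hx]
  · have h2 : ¬ x ∈ PySem.Set.ofList xs := fun h' => hx ((PySem.Set.mem_ofList xs x).1 h')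
    simp [h2, hx]

-- appending a record whose outer key differs from k0 changes nothing at k0
lemma pvIB_snoc_ne (rs : List pvRec) (r : pvRec) (k0 : String) (h : ¬ r.1 = k0) :
    pvIB (rs ++ [r]) k0 = pvIB rs k0 := by
  have hb : (r.1 == k0) = false := by simp [h]
  simp [pvIB, List.filter_append, hb]

lemma pvMain (rs : List pvRec) : (rs.foldl pvStepR PySem.Dict.empty).items = pvL rs := by
  induction rs using List.reverseRecOn with
  | nil => rfl
  | append_singleton rs r ih =>
    obtain ⟨a, b, p⟩ := r
    rw [List.foldl_append]
    set d := rs.foldl pvStepR PySem.Dict.empty with hd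
    have hkeys : d.keys = PySem.Set.ofList (rs.map (fun r => r.1)) := by
      simp [PySem.Dict.keys, ih, pvL, List.map_map, Function.comp_def]
    have hnd : d.keys.Nodup := by rw [hkeys]; exact PySem.Set.nodup_ofList _
    have hks : (rs ++ [(a, b, p)]).map (fun r => r.1) = rs.map (fun r => r.1) ++ [a] := by simp
    by_cases hmem : a ∈ rs.map (fun r => r.1)
    · -- outer key already present
      have hca : d.contains a = true := by
        rw [PySem.Dict.contains_iff_mem_keys, hkeys]
        exact (PySem.Set.mem_ofList _ _).2 hmem
      have hmemset : a ∈ PySem.Set.ofList (rs.map (fun r => r.1)) := (PySem.Set.mem_ofList _ _).2 hmem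
      have hitem : (a, PySem.Dict.mk (pvIB rs a)) ∈ d.items := by
        rw [ih]
        exact List.mem_map.2 ⟨a, hmemset, rfl⟩
      have hget : d.getD a PySem.Dict.empty = PySem.Dict.mk (pvIB rs a) :=
        PySem.Dict.getD_of_mem_items d hitem hnd _
      have hinkeys : (PySem.Dict.mk (pvIB rs a)).keys
          = PySem.Set.ofList ((rs.filter (fun r => r.1 == a)).map (fun r => r.2.1)) := by
        simp [PySem.Dict.keys, pvIB, List.map_map, Function.comp_def]
      have hinnd : (PySem.Dict.mk (pvIB rs a)).keys.Nodup := by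
        rw [hinkeys]; exact PySem.Set.nodup_ofList _
      -- the inner dict after the step
      have houter : ∀ inner' : PySem.Dict String (List pvP),
          inner'.items = pvIB (rs ++ [(a, b, p)]) a →
          (d.insert a inner').items = pvL (rs ++ [(a, b, p)]) := by
        intro inner' hinner'
        rw [PySem.Dict.items_insert_of_contains d inner' hca, ih]
        unfold pvL
        rw [hks, pvOfList_snoc, if_pos hmem, List.map_map]
        refine List.map_congr_left (fun k0 hk0 => ?_)
        have hmk : inner' = PySem.Dict.mk (pvIB (rs ++ [(a, b, p)]) a) := PySem.Dict.ext hinner'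
        by_cases hk : k0 = a
        · subst hk
          simp [Function.comp_def, hmk]
        · have hba : (k0 == a) = false := beq_eq_false_iff_ne.2 hk
          simp only [Function.comp_def, hba, Bool.false_eq_true, if_false,
            pvIB_snoc_ne rs (a, b, p) k0 (Ne.symm hk)]
      by_cases hb : b ∈ (rs.filter (fun r => r.1 == a)).map (fun r => r.2.1)
      · -- inner key present: modify (append)
        have hcb : (PySem.Dict.mk (pvIB rs a)).contains b = true := by
          rw [PySem.Dict.contains_iff_mem_keys, hinkeys]
          exact (PySem.Set.mem_ofList _ _).2 hb
        have hbitem : (b, (rs.filter (fun r => r.1 == a && r.2.1 == b)).map (fun r => r.2.2))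
            ∈ (PySem.Dict.mk (pvIB rs a)).items := by
          show _ ∈ pvIB rs a
          exact List.mem_map.2 ⟨b, (PySem.Set.mem_ofList _ _).2 hb, rfl⟩
        have hbget : (PySem.Dict.mk (pvIB rs a)).getD b []
            = (rs.filter (fun r => r.1 == a && r.2.1 == b)).map (fun r => r.2.2) :=
          PySem.Dict.getD_of_mem_items _ hbitem hinnd _
        show (pvStepR d (a, b, p)).items = _
        rw [pvStepR]
        simp only [hca, if_pos, hget, hcb]
        apply houter
        rw [PySem.Dict.modify, hbget,
          PySem.Dict.items_insert_of_contains _ _ hcb]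
        -- items of modified inner = pvIB (rs ++ [r]) a
        show List.map _ (pvIB rs a) = pvIB (rs ++ [(a, b, p)]) a
        unfold pvIB
        have hfa : ((rs ++ [(a, b, p)]).filter (fun r => r.1 == a))
            = rs.filter (fun r => r.1 == a) ++ [(a, b, p)] := by
          simp [List.filter_append]
        rw [hfa]
        have hbs : (rs.filter (fun r => r.1 == a) ++ [(a, b, p)]).map (fun r => r.2.1)
            = (rs.filter (fun r => r.1 == a)).map (fun r => r.2.1) ++ [b] := by simp
        rw [hbs, pvOfList_snoc, if_pos hb, List.map_map]
        refine List.map_congr_left (fun k1 hk1 => ?_)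
        by_cases hkb : k1 = b
        · subst hkb
          simp [List.filter_append]
        · have h1 : (k1 == b) = false := beq_eq_false_iff_ne.2 hkb
          have h2 : (b == k1) = false := beq_eq_false_iff_ne.2 (Ne.symm hkb)
          simp [h2, List.filter_append]
          exact fun h => absurd h hkb
      · -- inner key fresh: insert singleton list
        have hcb : (PySem.Dict.mk (pvIB rs a)).contains b = false := by
          rw [← Bool.not_eq_true, PySem.Dict.contains_iff_mem_keys, hinkeys]
          exact fun h => hb ((PySem.Set.mem_ofList _ _).1 h)
        show (pvStepR d (a, b, p)).items = _
        rw [pvStepR]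
        simp only [hca, if_pos, hget, hcb, Bool.false_eq_true, if_false]
        apply houter
        rw [PySem.Dict.items_insert_of_not_contains _ _ hcb]
        show pvIB rs a ++ [(b, [p])] = pvIB (rs ++ [(a, b, p)]) a
        unfold pvIB
        have hfa : ((rs ++ [(a, b, p)]).filter (fun r => r.1 == a))
            = rs.filter (fun r => r.1 == a) ++ [(a, b, p)] := by
          simp [List.filter_append]
        rw [hfa]
        have hbs : (rs.filter (fun r => r.1 == a) ++ [(a, b, p)]).map (fun r => r.2.1)
            = (rs.filter (fun r => r.1 == a)).map (fun r => r.2.1) ++ [b] := by simp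
        rw [hbs, pvOfList_snoc, if_neg hb, List.map_append]
        congr 1
        · refine List.map_congr_left (fun k1 hk1 => ?_)
          have hkb : ¬ k1 = b := fun h => hb (h ▸ (PySem.Set.mem_ofList _ _).1 hk1)
          have h2 : (b == k1) = false := beq_eq_false_iff_ne.2 (Ne.symm hkb)
          simp [List.filter_append, h2]
        · -- the new entry at b
          have hnil : rs.filter (fun r => r.1 == a && r.2.1 == b) = [] := by
            rw [List.filter_eq_nil_iff]
            intro r hr hcond
            simp only [Bool.and_eq_true, beq_iff_eq] at hcond
            exact hb (List.mem_map.2 ⟨r, List.mem_filter.2 ⟨hr, by simp [hcond.1]⟩, hcond.2⟩)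
          simp [List.filter_append, hnil]
    · -- outer key fresh
      have hca : d.contains a = false := by
        rw [← Bool.not_eq_true, PySem.Dict.contains_iff_mem_keys, hkeys]
        exact fun h => hmem ((PySem.Set.mem_ofList _ _).1 h)
      show (pvStepR d (a, b, p)).items = _
      rw [pvStepR]
      simp only [hca, Bool.false_eq_true, if_false]
      rw [PySem.Dict.items_insert_of_not_contains _ _ hca, ih]
      unfold pvL
      rw [hks, pvOfList_snoc, if_neg hmem, List.map_append]
      congr 1
      · refine List.map_congr_left (fun k0 hk0 => ?_)
        have hk : ¬ (a = k0) := fun h => hmem (by rw [h]; exact (PySem.Set.mem_ofList _ _).1 hk0)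
        simp [pvIB_snoc_ne rs (a, b, p) k0 hk]
      · -- the new entry at a
        have hnil0 : rs.filter (fun r => r.1 == a) = [] := by
          rw [List.filter_eq_nil_iff]
          intro r hr hcond
          simp only [beq_iff_eq] at hcond
          exact hmem (List.mem_map.2 ⟨r, hr, hcond⟩)
        have hnil1 : rs.filter (fun r => r.1 == a && r.2.1 == b) = [] := by
          rw [List.filter_eq_nil_iff]
          intro r hr hcond
          simp only [Bool.and_eq_true, beq_iff_eq] at hcond
          exact hmem (List.mem_map.2 ⟨r, hr, hcond.1⟩)
        simp [pvIB, List.filter_append, hnil0, hnil1, PySem.Set.ofList,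
          PySem.Set.add, PySem.Dict.ofList, PySem.Dict.update, PySem.Dict.insert,
          PySem.Dict.contains, PySem.Dict.empty]

-- ===== VERDICT (by name: the statement is the Claim_ definition above) =====
theorem construct_condition_template_hierarchy_spec : Claim_equal_construct_condition_template_hierarchy := by
  intro ts _
  unfold Spec_construct_condition_template_hierarchy
  unfold construct_condition_template_hierarchy construct_condition_template_hierarchy_alt
  rw [pvFoldA_eq, pvMain, pvRecStep_fold]
  simp [pvL, pvIB, PySem.List.dedup, List.map_map, Function.comp_def]
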